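-- pv_equiv track=rewrite | github.com/382335657/pythonHomework | Code/CodeRecords/2830/60797/291113.py | find
-- ===== SOURCE A (Python) =====
-- def find(b, k, data):
--     re = 0
--     for i in range(k-1,-1,-1):
--         re += data[k-i-1] * pow(b, i)
--     if re % 2 == 0:
--         return 'even'
--     else:
--         return 'odd'
-- ===== SOURCE B (Python) =====
-- def find(b, k, data):
--     # Parity only: b**i is odd iff b is odd or i == 0, so the weighted sum's
--     # parity is data[k-1]'s parity when b is even, else the parity of sum(data[:k]).
--     if k <= 0:
--         return 'even'
--     if b % 2 == 0:
--         total = data[k - 1]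
--     else:
--         total = sum(data[:k])
--     return 'odd' if total % 2 else 'even'
-- ===== Notes on version B (the rewrite author's own statement) =====
-- stated objective: faster
-- what changed: Instead of building the full base-b number with k bignum exponentiations, B uses that b^i is odd iff b is odd or i=0, so it reads the parity off data[k-1] (b even) or off sum(data[:k]) (b odd) in O(k) word operations.
import Mathlib
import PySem

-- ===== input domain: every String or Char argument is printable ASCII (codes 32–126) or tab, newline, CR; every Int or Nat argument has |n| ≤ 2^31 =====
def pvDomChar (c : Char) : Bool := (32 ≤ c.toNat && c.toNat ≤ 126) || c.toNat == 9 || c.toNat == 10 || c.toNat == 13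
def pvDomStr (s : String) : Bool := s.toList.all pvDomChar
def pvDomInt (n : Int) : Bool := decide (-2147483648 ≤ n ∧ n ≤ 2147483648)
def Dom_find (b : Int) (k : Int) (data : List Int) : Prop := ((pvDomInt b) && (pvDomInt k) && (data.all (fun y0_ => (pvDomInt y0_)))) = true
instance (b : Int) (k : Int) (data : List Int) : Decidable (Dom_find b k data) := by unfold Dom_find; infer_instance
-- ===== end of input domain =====

-- B changes the algorithm: it reads the parity directly (b^i is odd iff b is odd or i = 0)
-- instead of building the full base-b value with exponentiations; equality of the returned string is proved on Pre_.

-- ===== PORT A =====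
-- the loop threads Option: none = IndexError from data[k-i-1] (excluded by Pre_)
def find (b : Int) (k : Int) (data : List Int) : String :=
  let re : Option Int :=
    (PySem.List.pyRange (k - 1) (-1) (-1)).foldl
      (fun acc i =>
        match acc, PySem.List.pyGet? data (k - i - 1) with
        | some r, some d => some (r + d * b ^ i.toNat)
        | _, _ => none)
      (some 0)
  match re with
  | some r => if PySem.Int.mod r 2 == 0 then "even" else "odd"
  | none => ""

-- ===== PORT B =====
def find_alt (b : Int) (k : Int) (data : List Int) : String :=
  if k ≤ 0 then "even"
  else
    let total : Option Int :=
      if PySem.Int.mod b 2 == 0 then PySem.List.pyGet? data (k - 1)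
      else some (PySem.List.slice data none (some k)).sum
    match total with
    | some t => if PySem.Int.mod t 2 == 0 then "even" else "odd"
    | none => ""

-- ===== PRECONDITION & SPEC =====
-- Pre_ excludes exactly the inputs where A raises IndexError: k larger than len(data)
def Pre_find (b : Int) (k : Int) (data : List Int) : Prop := k ≤ (data.length : Int)
instance (b : Int) (k : Int) (data : List Int) : Decidable (Pre_find b k data) := by unfold Pre_find; infer_instance
def pvWitness_find : Int × Int × List Int := (2, 3, [1, 2, 3])
def Spec_find (b : Int) (k : Int) (data : List Int) (out : String) : Prop := out = find_alt b k data
instance (b : Int) (k : Int) (data : List Int) (out : String) : Decidable (Spec_find b k data out) := by unfold Spec_find; infer_instance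

-- ===== CLAIM (what is proved, stated in full; the proofs are below) =====
def Claim_equal_find : Prop := ∀ (b : Int) (k : Int) (data : List Int), Dom_find b k data → Pre_find b k data → Spec_find b k data (find b k data)

-- ===== LEMMAS AND PROOFS =====

-- the loop's step function
def findStep (b k : Int) (data : List Int) : Option Int → Int → Option Int :=
  fun acc i =>
    match acc, PySem.List.pyGet? data (k - i - 1) with
    | some r, some d => some (r + d * b ^ i.toNat)
    | _, _ => none

-- the weighted sum of the first t terms (i = exponent)
def wsum (b k : Int) (data : List Int) (t : Nat) : Int :=
  ∑ i ∈ Finset.range t, data.getD (k - 1 - (i : Int)).toNat 0 * b ^ i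

theorem findStep_eq (b k : Int) (data : List Int) :
    (fun (acc : Option Int) (i : Int) =>
        match acc, PySem.List.pyGet? data (k - i - 1) with
        | some r, some d => some (r + d * b ^ i.toNat)
        | _, _ => none) = findStep b k data := rfl

theorem find_loop_eq (b k : Int) (data : List Int) :
    ∀ (t : Nat) (acc : Int), (t : Int) ≤ k → k ≤ (data.length : Int) →
      List.foldl (findStep b k data) (some acc) (PySem.List.pyRange ((t : Int) - 1) (-1) (-1))
        = some (acc + wsum b k data t) := by
  intro t
  induction t with
  | zero =>
      intro acc _ _
      rw [PySem.List.pyRange_neg_one_eq_nil (by norm_num)]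
      simp [wsum]
  | succ t ih =>
      intro acc ht hk
      rw [show (((t + 1 : Nat) : Int) - 1) = ((t : Int) + 1) - 1 by push_cast; ring,
          show ((t : Int) + 1) - 1 = (t : Int) by ring,
          PySem.List.pyRange_neg_one_cons (by omega)]
      simp only [List.foldl_cons]
      have hget := PySem.List.pyGet?_eq_some_getElem (xs := data)
        (i := k - (t : Int) - 1) (by omega) (by omega)
      have hgd : data.getD (k - 1 - (t : Int)).toNat 0 = data[(k - (t : Int) - 1).toNat] := by
        rw [show k - 1 - (t : Int) = k - (t : Int) - 1 by ring, List.getD_eq_getElem?_getD,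
            List.getElem?_eq_getElem (by omega)]
        rfl
      have hstep : findStep b k data (some acc) ((t : Int))
          = some (acc + data.getD (k - 1 - (t : Int)).toNat 0 * b ^ t) := by
        simp only [findStep, hget, hgd, Int.toNat_natCast]
      rw [hstep, ih (acc + data.getD (k - 1 - (t : Int)).toNat 0 * b ^ t) (by omega) hk]
      congr 1
      simp [wsum, Finset.sum_range_succ]
      ring

-- parity of the weighted sum when b is even: only the i = 0 term matters
theorem wsum_parity_even (b k : Int) (data : List Int) (hb : b % 2 = 0) :
    ∀ t : Nat, 1 ≤ t → wsum b k data t % 2 = data.getD (k - 1).toNat 0 % 2 := by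
  intro t
  induction t with
  | zero => omega
  | succ t ih =>
      intro _
      by_cases h1 : 1 ≤ t
      · have heven : (2 : Int) ∣ data.getD (k - 1 - (t : Int)).toNat 0 * b ^ t := by
          obtain ⟨c, hc⟩ : (2 : Int) ∣ b := Int.dvd_of_emod_eq_zero hb
          obtain ⟨t', rfl⟩ : ∃ t', t = t' + 1 := ⟨t - 1, by omega⟩
          exact ⟨data.getD (k - 1 - ((t' + 1 : Nat) : Int)).toNat 0 * (c * b ^ t'),
            by rw [hc]; ring⟩
        rw [wsum, Finset.sum_range_succ, ← wsum]
        obtain ⟨c, hc⟩ := heven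
        rw [hc]
        have := ih h1
        omega
      · have ht0 : t = 0 := by omega
        subst ht0
        simp [wsum]
  -- i = 0 term: data.getD (k-1-0) * b^0

-- powers of an odd base are odd
theorem pow_odd_emod (b : Int) (hb : b % 2 = 1) : ∀ t : Nat, b ^ t % 2 = 1 := by
  intro t
  induction t with
  | zero => norm_num
  | succ t iht =>
      rw [pow_succ, Int.mul_emod, iht, hb]
      decide

-- parity of the weighted sum when b is odd: every power of b is odd
theorem wsum_parity_odd (b k : Int) (data : List Int) (hb : b % 2 ≠ 0) :
    ∀ t : Nat, wsum b k data t % 2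
      = (∑ i ∈ Finset.range t, data.getD (k - 1 - (i : Int)).toNat 0) % 2 := by
  have hbodd : b % 2 = 1 := by omega
  intro t
  induction t with
  | zero => simp [wsum]
  | succ t ih =>
      rw [wsum, Finset.sum_range_succ, ← wsum, Finset.sum_range_succ]
      have h1 : data.getD (k - 1 - (t : Int)).toNat 0 * b ^ t % 2
          = data.getD (k - 1 - (t : Int)).toNat 0 % 2 := by
        rw [Int.mul_emod, pow_odd_emod b hbodd t, mul_one,
            Int.emod_emod_of_dvd _ (by norm_num)]
      omega

-- prefix sum as a range sum
theorem sum_range_getD (data : List Int) : ∀ n : Nat, n ≤ data.length →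
    (∑ i ∈ Finset.range n, data.getD i 0) = (data.take n).sum := by
  intro n
  induction n with
  | zero => simp
  | succ m ihm =>
      intro h
      rw [Finset.sum_range_succ, ihm (by omega), List.sum_take_succ data m (by omega),
          List.getD_eq_getElem?_getD, List.getElem?_eq_getElem (by omega)]
      rfl

-- the reflected plain sum is the prefix sum
theorem sum_reflect_take (k : Int) (data : List Int) (n : Nat) (hn : k = (n : Int))
    (hlen : n ≤ data.length) :
    (∑ i ∈ Finset.range n, data.getD (k - 1 - (i : Int)).toNat 0) = (data.take n).sum := by
  subst hn
  rw [← Finset.sum_range_reflect]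
  have hterm : ∀ i ∈ Finset.range n,
      data.getD (((n : Nat) : Int) - 1 - ((n - 1 - i : Nat) : Int)).toNat 0 = data.getD i 0 := by
    intro i hi
    rw [Finset.mem_range] at hi
    congr 1
    omega
  rw [Finset.sum_congr rfl hterm, sum_range_getD data n hlen]

theorem pysem_mod_two (x : Int) : PySem.Int.mod x 2 = x % 2 :=
  PySem.Int.mod_eq_emod_of_pos (by norm_num)

-- ===== VERDICT (by name: the statement is the Claim_ definition above) =====
theorem find_spec : Claim_equal_find := by
  intro b k data _ hpre
  have hpre' : k ≤ (data.length : Int) := hpre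
  unfold Spec_find find find_alt
  rw [findStep_eq]
  by_cases hk : k ≤ 0
  · rw [PySem.List.pyRange_neg_one_eq_nil (by omega)]
    simp [hk]
  · have hk1 : 1 ≤ k := by omega
    have hkn : k = (k.toNat : Int) := by omega
    have hlen : k.toNat ≤ data.length := by omega
    have hloop := find_loop_eq b k data k.toNat 0 (by omega) hpre'
    rw [show ((k.toNat : Int) - 1) = k - 1 by omega] at hloop
    have hget := PySem.List.pyGet?_eq_some_getElem (xs := data) (i := k - 1)
      (by omega) (by omega)
    have hgd2 : data[(k - 1).toNat] = data.getD (k - 1).toNat 0 :=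
      (List.getD_eq_getElem data 0 (by omega)).symm
    have hslice : PySem.List.slice data none (some k) = data.take k.toNat :=
      PySem.List.slice_to data (show (0:Int) ≤ k by omega)
    simp only [hloop, if_neg hk, zero_add, hget, hgd2, hslice, pysem_mod_two]
    by_cases hb : b % 2 = 0
    · have hA := wsum_parity_even b k data hb k.toNat (by omega)
      simp [hb, hA]
    · have hbodd : b % 2 = 1 := by omega
      have hA := wsum_parity_odd b k data hb k.toNat
      rw [sum_reflect_take k data k.toNat hkn hlen] at hA
      simp [hbodd, hA]
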